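-- pv_equiv track=rewrite | github.com/00tarunkumar/SKU-Design-app | app.py | split_sku
-- ===== SOURCE A (Python) =====
-- def split_sku(sku):
--     parts = sku.strip().split("_")  # Remove extra spaces and split
--
--     # Extract size (last part of SKU if alphabetic)
--     size = parts[-1] if parts[-1].isalpha() else None
--
--     # Remove the size part from SKU
--     sku_core = parts[:-1] if size else parts
--
--     extracted_skus = []
--     prefix = sku_core[0]  # First part is always the initial prefix
--
--     i = 1
--     while i < len(sku_core):
--         if sku_core[i].isdigit():
--             extracted_skus.append(f"{prefix}_{sku_core[i]}")
--         else:
--             prefix = sku_core[i]  # If we find a new prefix, update it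
--         i += 1
--
--     return extracted_skus, size
-- ===== SOURCE B (Python) =====
-- def split_sku(sku):
--     parts = sku.strip().split("_")
--     size = parts[-1] if parts[-1].isalpha() else None
--     core = parts[:-1] if size else parts
--     # Forward-fill: for each part of core[1:], the prefix in effect there
--     # (last non-digit part before it, seeded by core[0]).
--     fills = []
--     p = core[0]
--     for part in core[1:]:
--         fills.append(p)
--         if not part.isdigit():
--             p = part
--     return [f"{pre}_{part}" for pre, part in zip(fills, core[1:]) if part.isdigit()], size
-- ===== Notes on version B (the rewrite author's own statement) =====
-- stated objective: alternative
-- what changed: A's single stateful while loop over indices that appends as it goes is replaced by a forward-fill pass computing the prefix in effect at each position, followed by a zip/filter/map comprehension that emits the pairs; size is computed the same way.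
import Mathlib
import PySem

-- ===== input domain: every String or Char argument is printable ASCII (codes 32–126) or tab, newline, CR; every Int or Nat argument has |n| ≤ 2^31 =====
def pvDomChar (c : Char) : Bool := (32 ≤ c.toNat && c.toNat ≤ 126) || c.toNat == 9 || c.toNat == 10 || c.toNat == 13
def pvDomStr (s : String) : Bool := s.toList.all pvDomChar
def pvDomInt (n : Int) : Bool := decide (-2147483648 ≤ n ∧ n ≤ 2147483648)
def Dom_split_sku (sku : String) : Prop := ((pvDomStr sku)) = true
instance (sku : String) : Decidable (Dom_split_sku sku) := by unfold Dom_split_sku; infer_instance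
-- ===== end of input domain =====

-- B replaces A's index-walking while loop by a forward-fill pass plus a zip/filter/map comprehension (different decomposition, same cost).

-- ===== PORT A =====
-- A's while loop over indices 1..len(sku_core)-1 with state (prefix, extracted_skus), ported as a foldl over range(1, len(core)).
def split_sku (sku : String) : List String × Option String :=
  let parts := (PySem.Str.split? (PySem.Str.strip sku) "_").getD []   -- "_" ≠ "", so split? never returns none
  let last := (PySem.List.pyGet? parts (-1)).getD ""                  -- parts is never empty, so parts[-1] never raises
  let size : Option String := if PySem.Str.strIsalpha last then some last else none
  let core := match size with
    | some _ => PySem.List.slice parts none (some (-1))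
    | none => parts
  let pfx := (PySem.List.pyGet? core 0).getD ""                       -- core[0]; raises in Python iff core = [] (excluded by Pre_)
  let st := (PySem.List.pyRange 1 (core.length : Int) 1).foldl
    (fun (st : String × List String) i =>
      let s := PySem.List.pyGetD core i ""
      if PySem.Str.strIsdigit s then (st.1, st.2 ++ [PySem.Str.join "_" [st.1, s]])
      else (s, st.2))
    (pfx, [])
  (st.2, size)

-- ===== PORT B =====
-- B's forward-fill loop: the prefix in effect at each position of core[1:].
def bFill (p : String) : List String → List String
  | [] => []
  | s :: rest => p :: bFill (if PySem.Str.strIsdigit s then p else s) rest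

def split_sku_alt (sku : String) : List String × Option String :=
  let parts := (PySem.Str.split? (PySem.Str.strip sku) "_").getD []
  let last := (PySem.List.pyGet? parts (-1)).getD ""
  let size : Option String := if PySem.Str.strIsalpha last then some last else none
  let core := match size with
    | some _ => PySem.List.slice parts none (some (-1))
    | none => parts
  let tail := PySem.List.slice core (some 1) none                     -- core[1:]
  let fills := bFill ((PySem.List.pyGet? core 0).getD "") tail
  (((fills.zip tail).filter (fun pr => PySem.Str.strIsdigit pr.2)).map
      (fun pr => PySem.Str.join "_" [pr.1, pr.2]),
   size)

-- ===== PRECONDITION & SPEC =====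
-- Pre_ excludes exactly the inputs where both Pythons raise IndexError on sku_core[0]: a sku that
-- strips and splits into a single alphabetic part (then size is truthy and sku_core is empty).
def Pre_split_sku (sku : String) : Prop :=
  ¬ (((PySem.Str.split? (PySem.Str.strip sku) "_").getD []).length = 1 ∧
     PySem.Str.strIsalpha (((PySem.Str.split? (PySem.Str.strip sku) "_").getD []).getLastD "") = true)
instance (sku : String) : Decidable (Pre_split_sku sku) := by unfold Pre_split_sku; infer_instance

def pvWitness_split_sku : String := "AB_1_CD_2_XL"

def Spec_split_sku (sku : String) (out : List String × Option String) : Prop := out = split_sku_alt sku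
instance (sku : String) (out : List String × Option String) : Decidable (Spec_split_sku sku out) := by unfold Spec_split_sku; infer_instance

-- ===== CLAIM (what is proved, stated in full; the proofs are below) =====
def Claim_equal_split_sku : Prop := ∀ (sku : String), Dom_split_sku sku → Pre_split_sku sku → Spec_split_sku sku (split_sku sku)

-- ===== LEMMAS AND PROOFS =====

-- A's loop with state (prefix, acc) equals acc ++ B's zip/filter/map over the forward-fill.
theorem aLoop_eq_b (tail : List String) (p : String) (acc : List String) :
    (tail.foldl
      (fun (st : String × List String) s =>
        if PySem.Str.strIsdigit s then (st.1, st.2 ++ [PySem.Str.join "_" [st.1, s]])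
        else (s, st.2))
      (p, acc)).2 =
    acc ++ (((bFill p tail).zip tail).filter (fun pr => PySem.Str.strIsdigit pr.2)).map
      (fun pr => PySem.Str.join "_" [pr.1, pr.2]) := by
  induction tail generalizing p acc with
  | nil => simp [bFill]
  | cons s rest ih =>
    simp only [List.foldl_cons, bFill, List.zip_cons_cons, List.filter_cons]
    by_cases h : PySem.Str.strIsdigit s = true
    · rw [if_pos h, if_pos h, if_pos h, ih, List.map_cons]
      simp
    · rw [if_neg h, if_neg h, if_neg h, ih]

-- The two ports agree for ANY core list and size value (A's loop body vs B's two passes).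
theorem core_eq (core : List String) (size : Option String) :
    (let pfx := (PySem.List.pyGet? core 0).getD ""
     let st := (PySem.List.pyRange 1 (core.length : Int) 1).foldl
       (fun (st : String × List String) i =>
         let s := PySem.List.pyGetD core i ""
         if PySem.Str.strIsdigit s then (st.1, st.2 ++ [PySem.Str.join "_" [st.1, s]])
         else (s, st.2))
       (pfx, [])
     ((st.2, size) : List String × Option String)) =
    (let tail := PySem.List.slice core (some 1) none
     let fills := bFill ((PySem.List.pyGet? core 0).getD "") tail
     (((fills.zip tail).filter (fun pr => PySem.Str.strIsdigit pr.2)).map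
        (fun pr => PySem.Str.join "_" [pr.1, pr.2]),
      size)) := by
  cases core with
  | nil =>
    simp [PySem.List.pyRange_one_eq_nil (by norm_num : (0:Int) ≤ 1), PySem.List.slice, bFill,
      PySem.List.clampIdx]
  | cons c0 ctail =>
    have hget0 : (PySem.List.pyGet? (c0 :: ctail) 0).getD "" = c0 := by
      simp [PySem.List.pyGet?, PySem.List.pyIdx?]
    have hslice1 : PySem.List.slice (c0 :: ctail) (some 1) none = ctail := by
      rw [PySem.List.slice_from_one]; rfl
    have hfold := PySem.List.foldl_pyRange_pyGetD' (c0 :: ctail) ""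
      (fun (st : String × List String) s =>
        if PySem.Str.strIsdigit s then (st.1, st.2 ++ [PySem.Str.join "_" [st.1, s]])
        else (s, st.2)) (c0, []) (a := 1) (by norm_num)
    simp only [hget0, hslice1]
    rw [hfold]
    simp only [Int.toNat_one, List.drop_succ_cons, List.drop_zero]
    rw [aLoop_eq_b]
    simp

-- ===== VERDICT (by name: the statement is the Claim_ definition above) =====
theorem split_sku_spec : Claim_equal_split_sku := by
  intro sku _ _
  unfold Spec_split_sku split_sku split_sku_alt
  exact core_eq _ _
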